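-- pv_equiv track=rewrite | github.com/schurick1502/haiku-automation | custom_components/haiku_automation/ai_features.py | _actions_conflict
-- ===== SOURCE A (Python) =====
-- from typing import Dict, Any, List, Optional, Tuple
--
-- def _actions_conflict(actions1: List, actions2: List) -> bool:
--     """Check if two action sets conflict."""
--     entities1 = set()
--     entities2 = set()
--
--     for action in actions1:
--         if 'entity_id' in action:
--             entities1.add(action['entity_id'])
--
--     for action in actions2:
--         if 'entity_id' in action:
--             entities2.add(action['entity_id'])
--
--     # Check if same entities are being controlled
--     return bool(entities1 & entities2)
-- ===== SOURCE B (Python) =====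
-- def _actions_conflict(actions1, actions2):
--     """Check if two action sets conflict."""
--     ids1 = sorted({a['entity_id'] for a in actions1 if 'entity_id' in a})
--     ids2 = sorted({a['entity_id'] for a in actions2 if 'entity_id' in a})
--     i = j = 0
--     while i < len(ids1) and j < len(ids2):
--         if ids1[i] == ids2[j]:
--             return True
--         if ids1[i] < ids2[j]:
--             i += 1
--         else:
--             j += 1
--     return False
-- ===== Notes on version B (the rewrite author's own statement) =====
-- stated objective: alternative
-- what changed: B replaces A's hash-set intersection with sort-then-merge: it sorts the distinct entity_ids of each side and detects a common element with a two-pointer merge scan, no hash-based intersection at all.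
import Mathlib
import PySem

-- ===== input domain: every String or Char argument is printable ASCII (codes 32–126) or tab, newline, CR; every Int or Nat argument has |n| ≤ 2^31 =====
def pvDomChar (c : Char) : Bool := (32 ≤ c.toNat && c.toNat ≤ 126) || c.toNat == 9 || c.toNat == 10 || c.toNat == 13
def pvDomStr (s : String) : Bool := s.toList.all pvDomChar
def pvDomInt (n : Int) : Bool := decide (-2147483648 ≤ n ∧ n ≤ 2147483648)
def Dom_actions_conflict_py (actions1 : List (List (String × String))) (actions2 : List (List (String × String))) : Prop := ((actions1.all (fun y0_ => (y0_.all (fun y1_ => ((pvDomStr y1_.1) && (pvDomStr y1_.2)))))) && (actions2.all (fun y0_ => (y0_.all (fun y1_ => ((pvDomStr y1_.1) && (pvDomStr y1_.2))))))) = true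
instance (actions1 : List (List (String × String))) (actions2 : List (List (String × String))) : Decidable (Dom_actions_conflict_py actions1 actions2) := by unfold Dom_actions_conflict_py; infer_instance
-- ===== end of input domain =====

-- B replaces A's hash-set intersection with sort-then-merge: sorted distinct ids per side, two-pointer merge scan (alternative algorithm, same result).

-- ===== PORT A =====
-- 'entity_id' in action  /  action['entity_id'] : dict membership / lookup (first match per convention)
def pvHasEid (action : List (String × String)) : Bool :=
  (PySem.Dict.mk action).contains "entity_id"

def pvEid (action : List (String × String)) : String :=
  (PySem.Dict.mk action).getD "entity_id" ""

def actions_conflict_py (actions1 : List (List (String × String))) (actions2 : List (List (String × String))) : Bool :=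
  let entities1 : PySem.Set String :=
    actions1.foldl (fun s action => if pvHasEid action then PySem.Set.add s (pvEid action) else s) PySem.Set.empty
  let entities2 : PySem.Set String :=
    actions2.foldl (fun s action => if pvHasEid action then PySem.Set.add s (pvEid action) else s) PySem.Set.empty
  -- bool(entities1 & entities2) : the intersection is truthy iff nonempty
  !(PySem.Set.inter entities1 entities2).isEmpty

-- ===== PORT B =====
-- sorted({a['entity_id'] for a in l if 'entity_id' in a})
def pvSortedIds (l : List (List (String × String))) : List String :=
  PySem.List.sorted (PySem.Set.ofList ((l.filter pvHasEid).map pvEid)) (fun x => x) false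

-- the two-pointer while loop of B, as recursion on the two sorted lists
def pvMerge : List String → List String → Bool
  | [], _ => false
  | _ :: _, [] => false
  | x :: xs, y :: ys =>
    if x = y then true
    else if x < y then pvMerge xs (y :: ys)
    else pvMerge (x :: xs) ys

def actions_conflict_py_alt (actions1 : List (List (String × String))) (actions2 : List (List (String × String))) : Bool :=
  pvMerge (pvSortedIds actions1) (pvSortedIds actions2)

-- ===== PRECONDITION & SPEC =====
def Spec_actions_conflict_py (actions1 : List (List (String × String))) (actions2 : List (List (String × String))) (out : Bool) : Prop := out = actions_conflict_py_alt actions1 actions2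
instance (actions1 : List (List (String × String))) (actions2 : List (List (String × String))) (out : Bool) : Decidable (Spec_actions_conflict_py actions1 actions2 out) := by unfold Spec_actions_conflict_py; infer_instance

-- ===== CLAIM =====
def Claim_equal_actions_conflict_py : Prop := ∀ (actions1 : List (List (String × String))) (actions2 : List (List (String × String))), Dom_actions_conflict_py actions1 actions2 → Spec_actions_conflict_py actions1 actions2 (actions_conflict_py actions1 actions2)

-- ===== LEMMAS AND PROOFS =====

-- membership in the fold that builds A's entity set
theorem mem_pvFold (l : List (List (String × String))) (s : PySem.Set String) (y : String) :
    (y ∈ l.foldl (fun s action => if pvHasEid action then PySem.Set.add s (pvEid action) else s) s)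
      ↔ y ∈ s ∨ ∃ a ∈ l, pvHasEid a = true ∧ pvEid a = y := by
  induction l generalizing s with
  | nil => simp
  | cons a l ih =>
    by_cases h : pvHasEid a = true
    · simp [h, ih, PySem.Set.mem_add]
      tauto
    · simp [h, ih]

-- membership in B's sorted distinct id list
theorem mem_pvSortedIds (l : List (List (String × String))) (y : String) :
    y ∈ pvSortedIds l ↔ ∃ a ∈ l, pvHasEid a = true ∧ pvEid a = y := by
  unfold pvSortedIds
  rw [PySem.List.mem_sorted, PySem.Set.mem_ofList]
  simp
  tauto

-- the merge scan finds a hit iff the two strictly sorted lists share an element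
theorem pvMerge_iff (l1 l2 : List String) :
    l1.Pairwise (· < ·) → l2.Pairwise (· < ·) →
      (pvMerge l1 l2 = true ↔ ∃ y, y ∈ l1 ∧ y ∈ l2) := by
  fun_induction pvMerge l1 l2 with
  | case1 l2 => intro _ _; simp
  | case2 x xs => intro _ _; simp
  | case3 xs y ys => intro _ _; simp
  | case4 x xs y ys hxy hlt ih =>
    intro h1 h2
    rw [ih (List.Pairwise.of_cons h1) h2]
    constructor
    · rintro ⟨z, hz1, hz2⟩; exact ⟨z, List.mem_cons_of_mem _ hz1, hz2⟩
    · rintro ⟨z, hz1, hz2⟩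
      rcases List.mem_cons.mp hz1 with rfl | hz1
      · exfalso
        rcases List.mem_cons.mp hz2 with rfl | hz2
        · exact hxy rfl
        · exact absurd (lt_trans hlt ((List.pairwise_cons.mp h2).1 _ hz2)) (lt_irrefl _)
      · exact ⟨z, hz1, hz2⟩
  | case5 x xs y ys hxy hlt ih =>
    intro h1 h2
    rw [ih h1 (List.Pairwise.of_cons h2)]
    have hyx : y < x := lt_of_le_of_ne (not_lt.mp hlt) (fun h => hxy h.symm)
    constructor
    · rintro ⟨z, hz1, hz2⟩; exact ⟨z, hz1, List.mem_cons_of_mem _ hz2⟩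
    · rintro ⟨z, hz1, hz2⟩
      rcases List.mem_cons.mp hz2 with rfl | hz2
      · exfalso
        rcases List.mem_cons.mp hz1 with rfl | hz1
        · exact hxy rfl
        · exact absurd (lt_trans hyx ((List.pairwise_cons.mp h1).1 _ hz1)) (lt_irrefl _)
      · exact ⟨z, hz1, hz2⟩

theorem pvSortedIds_pairwise (l : List (List (String × String))) :
    (pvSortedIds l).Pairwise (· < ·) := by
  unfold pvSortedIds
  exact PySem.List.sorted_ofList_pairwise_lt _

-- ===== VERDICT =====
theorem actions_conflict_py_spec : Claim_equal_actions_conflict_py := by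
  intro actions1 actions2 _
  unfold Spec_actions_conflict_py actions_conflict_py actions_conflict_py_alt
  set e1 := actions1.foldl (fun s action => if pvHasEid action then PySem.Set.add s (pvEid action) else s) PySem.Set.empty with he1
  set e2 := actions2.foldl (fun s action => if pvHasEid action then PySem.Set.add s (pvEid action) else s) PySem.Set.empty with he2
  have hA : (!(PySem.Set.inter e1 e2).isEmpty) = true ↔ ∃ y, y ∈ e1 ∧ y ∈ e2 := by
    rw [Bool.not_eq_true', List.isEmpty_eq_false_iff_exists_mem]
    constructor
    · rintro ⟨y, hy⟩; exact ⟨y, (PySem.Set.mem_inter _ _ _).mp hy⟩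
    · rintro ⟨y, hy⟩; exact ⟨y, (PySem.Set.mem_inter _ _ _).mpr hy⟩
  have hmem1 : ∀ y, y ∈ e1 ↔ y ∈ pvSortedIds actions1 := by
    intro y; rw [he1, mem_pvFold, mem_pvSortedIds]; simp [PySem.Set.empty]
  have hmem2 : ∀ y, y ∈ e2 ↔ y ∈ pvSortedIds actions2 := by
    intro y; rw [he2, mem_pvFold, mem_pvSortedIds]; simp [PySem.Set.empty]
  have hB : pvMerge (pvSortedIds actions1) (pvSortedIds actions2) = true ↔ ∃ y, y ∈ e1 ∧ y ∈ e2 := by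
    rw [pvMerge_iff _ _ (pvSortedIds_pairwise _) (pvSortedIds_pairwise _)]
    constructor
    · rintro ⟨y, h1, h2⟩; exact ⟨y, (hmem1 y).mpr h1, (hmem2 y).mpr h2⟩
    · rintro ⟨y, h1, h2⟩; exact ⟨y, (hmem1 y).mp h1, (hmem2 y).mp h2⟩
  exact Bool.eq_iff_iff.mpr (hA.trans hB.symm)
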